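-- pv_equiv track=rewrite | github.com/alenzhao/oncotator | oncotator/output/VcfOutputRenderer.py | __createChromHashCodeTable
-- ===== SOURCE A (Python) =====
-- def __createChromHashCodeTable(chroms):
--     chromHashCodeTable = dict()
--     highestHashCode = 0
--     for chrom in chroms:
--         chromHashCodeTable[chrom] = None
--         if chrom.isdigit():
--             chromHashCodeTable[chrom] = int(chrom)
--             if highestHashCode < chromHashCodeTable[chrom]:
--                 highestHashCode = chromHashCodeTable[chrom]
--     index = 0
--     for chrom in sorted(chroms):
--         if chromHashCodeTable[chrom] is None:
--             if chrom.upper() == 'X': # X chromosome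
--                 chromHashCodeTable[chrom] = highestHashCode + 1
--             elif chrom.upper() == 'Y': # Y chrmomosome
--                 chromHashCodeTable[chrom] = highestHashCode + 2
--             elif (chrom.upper() == 'M') or (chrom.upper() == 'MT'): # mitochondrial chrmomosome
--                 chromHashCodeTable[chrom] = highestHashCode + 3
--             else:
--                 index += 1
--                 chromHashCodeTable[chrom] = highestHashCode + index + 3
--     return chromHashCodeTable
-- ===== SOURCE B (Python) =====
-- def __createChromHashCodeTable(chroms):
--     # No sorting anywhere: a non-special name's code is computed by COUNTING the
--     # distinct non-special names lexicographically <= it, which equals its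
--     # 1-based rank in sorted order; digits and X/Y/M/MT are coded directly.
--     highest = 0
--     for c in chroms:
--         if c.isdigit():
--             v = int(c)
--             if v > highest:
--                 highest = v
--     others = {c for c in chroms
--               if not c.isdigit() and c.upper() not in ('X', 'Y', 'M', 'MT')}
--     table = {}
--     for c in chroms:
--         if c in table:
--             continue
--         if c.isdigit():
--             table[c] = int(c)
--         else:
--             u = c.upper()
--             if u == 'X':
--                 table[c] = highest + 1
--             elif u == 'Y':
--                 table[c] = highest + 2
--             elif u in ('M', 'MT'):
--                 table[c] = highest + 3
--             else:
--                 table[c] = highest + 3 + sum(1 for d in others if d <= c)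
--     return table
-- ===== Notes on version B (the rewrite author's own statement) =====
-- stated objective: alternative
-- what changed: A assigns codes to non-special names by walking the sorted chromosome list with a mutable running index; B never sorts: it computes each non-special name's code directly as highest+3 plus the count of distinct non-special names lexicographically <= it (its rank by counting), assembling the table in one classification pass.
import Mathlib
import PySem

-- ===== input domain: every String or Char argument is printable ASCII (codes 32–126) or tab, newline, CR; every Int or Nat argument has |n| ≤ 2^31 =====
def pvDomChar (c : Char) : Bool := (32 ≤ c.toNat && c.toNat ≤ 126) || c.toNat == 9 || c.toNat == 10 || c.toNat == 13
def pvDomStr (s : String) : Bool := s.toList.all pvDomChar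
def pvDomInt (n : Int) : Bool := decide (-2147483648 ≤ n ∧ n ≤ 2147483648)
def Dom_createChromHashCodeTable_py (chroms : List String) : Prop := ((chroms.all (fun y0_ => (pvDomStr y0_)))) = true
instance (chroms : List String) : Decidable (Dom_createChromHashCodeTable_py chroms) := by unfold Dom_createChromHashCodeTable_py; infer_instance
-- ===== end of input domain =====

-- B removes A's sorting and mutable running index entirely: each non-special name's
-- code is highest+3 plus the COUNT of distinct non-special names lexicographically
-- ≤ it; objective: alternative algorithm (counting rank instead of sorted walk).

-- ===== PORT A =====
-- first 'for chrom in chroms' loop body of A (dict of Optional values; None = not yet coded)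
def pvA_step1 (st : PySem.Dict String (Option Int) × Int) (chrom : String) :
    PySem.Dict String (Option Int) × Int :=
  let tbl := st.1.insert chrom none
  if PySem.Str.strIsdigit chrom then
    let v : Int := (PySem.Int.ofStr? chrom).getD 0   -- int(chrom); isdigit guarantees it parses
    let tbl := tbl.insert chrom (some v)
    if st.2 < v then (tbl, v) else (tbl, st.2)
  else (tbl, st.2)

-- second 'for chrom in sorted(chroms)' loop body of A (hh = highestHashCode, st.2 = index)
def pvA_step2 (hh : Int) (st : PySem.Dict String (Option Int) × Int) (chrom : String) :
    PySem.Dict String (Option Int) × Int :=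
  match st.1.get? chrom with
  | some none =>
    if PySem.Str.upper chrom = "X" then (st.1.insert chrom (some (hh + 1)), st.2)
    else if PySem.Str.upper chrom = "Y" then (st.1.insert chrom (some (hh + 2)), st.2)
    else if PySem.Str.upper chrom = "M" ∨ PySem.Str.upper chrom = "MT" then
      (st.1.insert chrom (some (hh + 3)), st.2)
    else (st.1.insert chrom (some (hh + (st.2 + 1) + 3)), st.2 + 1)
  | _ => st

def createChromHashCodeTable_py (chroms : List String) : List (String × Int) :=
  let p1 := chroms.foldl pvA_step1 (PySem.Dict.empty, 0)
  let p2 := (PySem.List.sorted chroms (fun x => x) false).foldl (pvA_step2 p1.2) (p1.1, (0 : Int))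
  p2.1.items.map (fun p => (p.1, p.2.getD 0))   -- all values are filled in; Option is A's transient None

-- ===== PORT B =====
-- 'others' filter of B: not a digit string and upper() not one of X/Y/M/MT
def pvB_isOther (c : String) : Bool :=
  !PySem.Str.strIsdigit c && !(["X", "Y", "M", "MT"].contains (PySem.Str.upper c))

-- B's assembly loop body ('if c in table: continue' then direct classification;
-- the else branch is Source B's 'sum(1 for d in others if d <= c)')
def pvB_step (highest : Int) (others : List String)
    (tbl : PySem.Dict String Int) (c : String) : PySem.Dict String Int :=
  if tbl.contains c then tbl
  else if PySem.Str.strIsdigit c then tbl.insert c ((PySem.Int.ofStr? c).getD 0)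
  else if PySem.Str.upper c = "X" then tbl.insert c (highest + 1)
  else if PySem.Str.upper c = "Y" then tbl.insert c (highest + 2)
  else if PySem.Str.upper c = "M" ∨ PySem.Str.upper c = "MT" then tbl.insert c (highest + 3)
  else tbl.insert c (highest + 3 + ((others.countP (fun d => decide (d ≤ c))) : Int))

def createChromHashCodeTable_py_alt (chroms : List String) : List (String × Int) :=
  let highest : Int := chroms.foldl
    (fun h c =>
      if PySem.Str.strIsdigit c then
        let v : Int := (PySem.Int.ofStr? c).getD 0
        if h < v then v else h
      else h) 0
  let others := PySem.Set.ofList (chroms.filter pvB_isOther)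
  (chroms.foldl (pvB_step highest others) PySem.Dict.empty).items

-- ===== PRECONDITION & SPEC =====
def Spec_createChromHashCodeTable_py (chroms : List String) (out : List (String × Int)) : Prop := out = createChromHashCodeTable_py_alt chroms
instance (chroms : List String) (out : List (String × Int)) : Decidable (Spec_createChromHashCodeTable_py chroms out) := by unfold Spec_createChromHashCodeTable_py; infer_instance

-- ===== CLAIM (what is proved, stated in full; the proofs are below) =====
def Claim_equal_createChromHashCodeTable_py : Prop := ∀ (chroms : List String), Dom_createChromHashCodeTable_py chroms → Spec_createChromHashCodeTable_py chroms (createChromHashCodeTable_py chroms)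

-- ===== LEMMAS AND PROOFS =====

-- value A's first loop leaves at key c
def pvVal0 (c : String) : Option Int :=
  if PySem.Str.strIsdigit c then some ((PySem.Int.ofStr? c).getD 0) else none

-- upper() is none of X/Y/M/MT (the else-branch of the None case)
def pvUpOther (c : String) : Bool :=
  !(PySem.Str.upper c = "X" || PySem.Str.upper c = "Y" ||
    PySem.Str.upper c = "M" || PySem.Str.upper c = "MT")

-- 'still None in the table and not yet assigned'
def pvPend (d : PySem.Dict String (Option Int)) (y : String) : Bool :=
  (d.get? y == some none) && pvUpOther y

def pvCntLt (d : PySem.Dict String (Option Int)) (T : Finset String) (x : String) : ℕ :=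
  (T.filter (fun y => pvPend d y = true ∧ y < x)).card

def pvCntAll (d : PySem.Dict String (Option Int)) (T : Finset String) : ℕ :=
  (T.filter (fun y => pvPend d y = true)).card

-- value A's second loop writes at a pending key x when 'index' is i on entry
def pvBr (hh : Int) (x : String) (i : Int) : Int :=
  if PySem.Str.upper x = "X" then hh + 1
  else if PySem.Str.upper x = "Y" then hh + 2
  else if PySem.Str.upper x = "M" ∨ PySem.Str.upper x = "MT" then hh + 3
  else hh + (i + 1) + 3

theorem pvA_highest (chroms : List String) (d : PySem.Dict String (Option Int)) (h : Int) :
    (chroms.foldl pvA_step1 (d, h)).2 =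
      chroms.foldl (fun h c =>
        if PySem.Str.strIsdigit c then
          let v : Int := (PySem.Int.ofStr? c).getD 0
          if h < v then v else h
        else h) h := by
  induction chroms generalizing d h with
  | nil => rfl
  | cons c cs ih =>
    simp only [List.foldl_cons, pvA_step1]
    split
    · split
      · exact ih _ _
      · exact ih _ _
    · exact ih _ _

theorem pvA_loop1_dict (chroms : List String) (d : PySem.Dict String (Option Int)) (h : Int) :
    (chroms.foldl pvA_step1 (d, h)).1 =
      chroms.foldl (fun t c => t.insert c (pvVal0 c)) d := by
  induction chroms generalizing d h with
  | nil => rfl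
  | cons c cs ih =>
    simp only [List.foldl_cons, pvA_step1, pvVal0]
    split
    · rw [PySem.Dict.insert_insert_self]
      split
      · exact ih _ _
      · exact ih _ _
    · exact ih _ _

theorem pv_get_foldl_insert (l : List String) (f : String → Option Int)
    (d : PySem.Dict String (Option Int)) (x : String) :
    (l.foldl (fun t c => t.insert c (f c)) d).get? x =
      if x ∈ l then some (f x) else d.get? x := by
  induction l generalizing d with
  | nil => simp
  | cons c cs ih =>
    simp only [List.foldl_cons, ih, List.mem_cons]
    by_cases hx : x ∈ cs
    · simp [hx]
    · by_cases hc : x = c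
      · simp [hc, PySem.Dict.get?_insert_self]
      · simp [hx, hc, PySem.Dict.get?_insert_of_ne _ _ hc]

theorem pvCnt_insert_notPend (d : PySem.Dict String (Option Int)) (T : Finset String)
    (c : String) (hp : pvPend d c = false) :
    (∀ x, pvCntLt d (insert c T) x = pvCntLt d T x) ∧ pvCntAll d (insert c T) = pvCntAll d T := by
  constructor
  · intro x
    unfold pvCntLt
    rw [Finset.filter_insert]
    simp [hp]
  · unfold pvCntAll
    rw [Finset.filter_insert]
    simp [hp]

theorem pvCntLt_insert_not_lt (d : PySem.Dict String (Option Int)) (T : Finset String)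
    (c x : String) (hx : ¬ c < x) :
    pvCntLt d (insert c T) x = pvCntLt d T x := by
  unfold pvCntLt
  rw [Finset.filter_insert]
  simp [hx]

theorem pvCntAll_insert_pend (d : PySem.Dict String (Option Int)) (T : Finset String)
    (c : String) (hp : pvPend d c = true) (hc : c ∉ T) :
    pvCntAll d (insert c T) = pvCntAll d T + 1 := by
  unfold pvCntAll
  rw [Finset.filter_insert]
  simp only [hp, if_true]
  exact Finset.card_insert_of_notMem (fun h => hc (Finset.mem_filter.mp h).1)

theorem pvCntLt_eq_all (d : PySem.Dict String (Option Int)) (T : Finset String)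
    (x : String) (hall : ∀ y ∈ T, y < x) :
    pvCntLt d T x = pvCntAll d T := by
  unfold pvCntLt pvCntAll
  congr 1
  apply Finset.filter_congr
  intro y hy
  simp [hall y hy]

theorem pvA_loop2 (hh : Int) (l : List String) (d : PySem.Dict String (Option Int)) (j : Int)
    (hs : l.Pairwise (· ≤ ·)) :
    (∀ x, (l.foldl (pvA_step2 hh) (d, j)).1.get? x =
        if x ∈ l ∧ d.get? x = some none
        then some (some (pvBr hh x (j + pvCntLt d l.toFinset x)))
        else d.get? x)
    ∧ (l.foldl (pvA_step2 hh) (d, j)).1.keys = d.keys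
    ∧ (l.foldl (pvA_step2 hh) (d, j)).2 = j + pvCntAll d l.toFinset := by
  induction l using List.reverseRecOn with
  | nil => simp [pvCntAll]
  | append_singleton t c ih =>
    rw [List.pairwise_append] at hs
    obtain ⟨hst, -, hle⟩ := hs
    have hle' : ∀ y ∈ t, y ≤ c := fun y hy => hle y hy c (by simp)
    obtain ⟨ihg, ihk, ihn⟩ := ih hst
    rw [List.foldl_append]
    simp only [List.foldl_cons, List.foldl_nil]
    set r := t.foldl (pvA_step2 hh) (d, j) with hr
    have hTF : (t ++ [c]).toFinset = insert c t.toFinset := by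
      simp [List.toFinset_append]
    by_cases hdc : d.get? c = some none
    · by_cases hct : c ∈ t
      · -- duplicate last element: already assigned, step is a no-op
        have hrc : r.1.get? c = some (some (pvBr hh c (j + pvCntLt d t.toFinset c))) := by
          rw [ihg c, if_pos ⟨hct, hdc⟩]
        have hT : (t ++ [c]).toFinset = t.toFinset := by
          rw [hTF, Finset.insert_eq_self.mpr (List.mem_toFinset.mpr hct)]
        refine ⟨?_, ?_, ?_⟩
        · intro x
          rw [pvA_step2, hrc]
          rw [ihg x, hT]
          have hmm : x ∈ t ++ [c] ↔ x ∈ t := by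
            simp only [List.mem_append, List.mem_singleton]
            exact ⟨fun h => h.elim id (fun he => he ▸ hct), Or.inl⟩
          simp only [hmm]
        · rw [pvA_step2, hrc]; exact ihk
        · rw [pvA_step2, hrc, ihn, hT]
      · -- first processing of c: it is assigned now
        have hrc : r.1.get? c = some none := by
          rw [ihg c, if_neg (fun h => hct h.1), hdc]
        have hcontains : r.1.contains c = true := by
          rw [PySem.Dict.contains_eq_isSome_get?, hrc]; rfl
        have hcT : c ∉ t.toFinset := fun h => hct (List.mem_toFinset.mp h)
        have hltc : ∀ y ∈ t.toFinset, y < c := by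
          intro y hy
          have hy' := List.mem_toFinset.mp hy
          exact lt_of_le_of_ne (hle' y hy') (fun he => hct (he ▸ hy'))
        -- common treatment of the four branches
        have hW : pvA_step2 hh r c =
            (r.1.insert c (some (pvBr hh c (j + pvCntLt d (t ++ [c]).toFinset c))),
             j + pvCntAll d (t ++ [c]).toFinset) := by
          rw [pvA_step2, hrc, hTF]
          unfold pvBr
          split_ifs with h1 h2 h3
          · have hpc : pvPend d c = false := by simp [pvPend, pvUpOther, h1]
            obtain ⟨-, hca⟩ := pvCnt_insert_notPend d t.toFinset c hpc
            rw [hca, ihn]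
          · have hpc : pvPend d c = false := by simp [pvPend, pvUpOther, h2]
            obtain ⟨-, hca⟩ := pvCnt_insert_notPend d t.toFinset c hpc
            rw [hca, ihn]
          · have hpc : pvPend d c = false := by
              rcases h3 with h3 | h3 <;> simp [pvPend, pvUpOther, h3]
            obtain ⟨-, hca⟩ := pvCnt_insert_notPend d t.toFinset c hpc
            rw [hca, ihn]
          · have hup : pvUpOther c = true := by
              simp [pvUpOther, h1, h2]
              exact not_or.mp h3
            have hpc : pvPend d c = true := by simp [pvPend, hdc, hup]
            have hcl : pvCntLt d (insert c t.toFinset) c = pvCntAll d t.toFinset := by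
              rw [pvCntLt_insert_not_lt d t.toFinset c c (lt_irrefl c),
                pvCntLt_eq_all d t.toFinset c hltc]
            rw [hcl, pvCntAll_insert_pend d t.toFinset c hpc hcT, ihn]
            have hc2 : ((pvCntAll d t.toFinset + 1 : ℕ) : Int) = (pvCntAll d t.toFinset : Int) + 1 := by push_cast; ring
            rw [hc2]
            refine Prod.ext ?_ ?_
            · rfl
            · show j + (pvCntAll d t.toFinset : Int) + 1 = j + ((pvCntAll d t.toFinset : Int) + 1)
              ring
        rw [hW]
        refine ⟨?_, ?_, rfl⟩
        · intro x
          by_cases hxc : x = c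
          · subst hxc
            rw [PySem.Dict.get?_insert_self]
            rw [if_pos ⟨by simp, hdc⟩]
          · rw [PySem.Dict.get?_insert_of_ne _ _ hxc, ihg x]
            by_cases hcond : x ∈ t ∧ d.get? x = some none
            · have hxt : x ∈ t := hcond.1
              have hxlt : x < c := hltc x (List.mem_toFinset.mpr hxt)
              rw [if_pos hcond, if_pos ⟨by simp [hxt], hcond.2⟩, hTF,
                pvCntLt_insert_not_lt d t.toFinset c x (lt_asymm hxlt)]
            · rw [if_neg hcond, if_neg]
              rintro ⟨hm, hp⟩
              exact hcond ⟨by rcases List.mem_append.mp hm with h | h; exact h; exact absurd (List.mem_singleton.mp h) hxc, hp⟩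
        · rw [PySem.Dict.keys_insert_of_contains _ _ hcontains, ihk]
    · -- c was a digit key (or absent): match falls through
      have hpc : pvPend d c = false := by
        unfold pvPend
        have : (d.get? c == some none) = false := by
          simp [hdc]
        simp [this]
      have hrc : r.1.get? c = d.get? c := by
        rw [ihg c, if_neg (fun h => hdc h.2)]
      have step_eq : pvA_step2 hh r c = r := by
        rw [pvA_step2, hrc]
        cases hv : d.get? c with
        | none => rfl
        | some o => cases o with
          | none => exact absurd hv hdc
          | some v => rfl
      rw [step_eq]
      obtain ⟨hcl, hca⟩ := pvCnt_insert_notPend d t.toFinset c hpc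
      refine ⟨?_, ihk, ?_⟩
      · intro x
        rw [ihg x, hTF, hcl x]
        by_cases hx : x ∈ t
        · simp [hx]
        · by_cases hxc : x = c
          · subst hxc
            simp [hx, hdc]
          · simp [hx, hxc]
      · rw [ihn, hTF, hca]

-- the value B's step inserts at a fresh key
def pvB_g (highest : Int) (others : List String) (c : String) : Int :=
  if PySem.Str.strIsdigit c then (PySem.Int.ofStr? c).getD 0
  else if PySem.Str.upper c = "X" then highest + 1
  else if PySem.Str.upper c = "Y" then highest + 2
  else if PySem.Str.upper c = "M" ∨ PySem.Str.upper c = "MT" then highest + 3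
  else highest + 3 + ((others.countP (fun d => decide (d ≤ c))) : Int)

theorem pvB_step_not_contains (highest : Int) (others : List String)
    (d : PySem.Dict String Int) (c : String) (hc : d.contains c = false) :
    pvB_step highest others d c = d.insert c (pvB_g highest others c) := by
  unfold pvB_step pvB_g
  rw [if_neg (by simp [hc])]
  split_ifs <;> rfl

theorem pvB_loop (highest : Int) (others : List String) (l : List String)
    (d : PySem.Dict String Int)
    (hd : ∀ x, d.contains x = true → d.get? x = some (pvB_g highest others x)) :
    (∀ x, (l.foldl (pvB_step highest others) d).get? x =
        if x ∈ l then some (pvB_g highest others x) else d.get? x)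
    ∧ (l.foldl (pvB_step highest others) d).keys = PySem.Set.update d.keys l := by
  induction l generalizing d with
  | nil => simp [PySem.Set.update]
  | cons c cs ih =>
    simp only [List.foldl_cons]
    by_cases hc : d.contains c = true
    · have hstep : pvB_step highest others d c = d := by unfold pvB_step; rw [if_pos hc]
      rw [hstep]
      obtain ⟨ihg, ihk⟩ := ih d hd
      refine ⟨?_, ?_⟩
      · intro x
        rw [ihg x]
        by_cases hx : x ∈ cs
        · simp [hx]
        · by_cases hxc : x = c
          · subst hxc
            simp [hx, hd x hc]
          · simp [hx, hxc]
      · rw [ihk]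
        have hadd : PySem.Set.add d.keys c = d.keys := by
          unfold PySem.Set.add
          rw [if_pos (by simp [(PySem.Dict.contains_iff_mem_keys d c).mp hc])]
        show _ = PySem.Set.update d.keys (c :: cs)
        unfold PySem.Set.update
        rw [List.foldl_cons, show PySem.Set.add d.keys c = d.keys from hadd]
    · have hc' : d.contains c = false := by simpa using hc
      rw [pvB_step_not_contains highest others d c hc']
      have hd' : ∀ x, (d.insert c (pvB_g highest others c)).contains x = true →
          (d.insert c (pvB_g highest others c)).get? x = some (pvB_g highest others x) := by
        intro x hx
        by_cases hxc : x = c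
        · subst hxc; rw [PySem.Dict.get?_insert_self]
        · rw [PySem.Dict.get?_insert_of_ne _ _ hxc]
          rw [PySem.Dict.contains_insert] at hx
          simp only [Bool.or_eq_true, beq_iff_eq] at hx
          exact hd x (hx.resolve_left hxc)
      obtain ⟨ihg, ihk⟩ := ih _ hd'
      refine ⟨?_, ?_⟩
      · intro x
        rw [ihg x]
        by_cases hx : x ∈ cs
        · simp [hx]
        · by_cases hxc : x = c
          · subst hxc
            simp [hx, PySem.Dict.get?_insert_self]
          · simp [hx, hxc, PySem.Dict.get?_insert_of_ne _ _ hxc]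
      · rw [ihk, PySem.Dict.keys_insert_of_not_contains _ _ hc']
        show PySem.Set.update (d.keys ++ [c]) cs = PySem.Set.update d.keys (c :: cs)
        unfold PySem.Set.update
        rw [List.foldl_cons]
        congr 1
        unfold PySem.Set.add
        rw [if_neg]
        intro hmem
        exact (Bool.eq_false_iff.mp hc')
          ((PySem.Dict.contains_iff_mem_keys d c).mpr (by simpa [PySem.Set.contains] using hmem))

theorem pv_contains_eq (u : String) :
    (["X", "Y", "M", "MT"].contains u) =
      (u = "X" || u = "Y" || u = "M" || u = "MT") := by
  simp [List.contains_eq_mem, Bool.or_assoc]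

theorem pvB_isOther_eq (y : String) :
    pvB_isOther y = (!PySem.Str.strIsdigit y && pvUpOther y) := by
  unfold pvB_isOther pvUpOther
  rw [pv_contains_eq]

-- the counting rank: for k in the (nodup) 'others' list, #{d ∈ others | d ≤ k} = #{d | d < k} + 1
theorem pv_countP_le (OS : List String) (hnd : OS.Nodup) (k : String) (hk : k ∈ OS) :
    OS.countP (fun d => decide (d ≤ k)) =
      (OS.toFinset.filter (fun y => y < k)).card + 1 := by
  rw [List.countP_eq_length_filter]
  have hndf : (OS.filter (fun d => decide (d ≤ k))).Nodup := hnd.filter _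
  rw [← List.toFinset_card_of_nodup hndf, List.toFinset_filter]
  have hset : OS.toFinset.filter (fun y => decide (y ≤ k) = true) =
      insert k (OS.toFinset.filter (fun y => y < k)) := by
    apply Finset.ext
    intro y
    simp only [Finset.mem_filter, Finset.mem_insert, decide_eq_true_eq]
    constructor
    · rintro ⟨hy, hle⟩
      rcases lt_or_eq_of_le hle with h | h
      · exact Or.inr ⟨hy, h⟩
      · exact Or.inl h
    · rintro (h | ⟨hy, hlt⟩)
      · exact ⟨h ▸ List.mem_toFinset.mpr hk, le_of_eq h⟩
      · exact ⟨hy, le_of_lt hlt⟩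
  rw [hset, Finset.card_insert_of_notMem (by simp)]

theorem pv_main (chroms : List String) :
    createChromHashCodeTable_py chroms = createChromHashCodeTable_py_alt chroms := by
  have hHdef : (chroms.foldl pvA_step1 (PySem.Dict.empty, 0)).2 =
      chroms.foldl (fun h c =>
        if PySem.Str.strIsdigit c then
          let v : Int := (PySem.Int.ofStr? c).getD 0
          if h < v then v else h
        else h) 0 := pvA_highest chroms _ 0
  set H : Int := chroms.foldl (fun h c =>
      if PySem.Str.strIsdigit c then
        let v : Int := (PySem.Int.ofStr? c).getD 0
        if h < v then v else h
      else h) 0 with hHs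
  set S : List String := PySem.List.sorted chroms (fun x => x) false with hSs
  set T0 : PySem.Dict String (Option Int) :=
    chroms.foldl (fun t c => t.insert c (pvVal0 c)) PySem.Dict.empty with hT0s
  set OS : List String := PySem.Set.ofList (chroms.filter pvB_isOther) with hOSs
  -- facts about the shared pieces
  have hT0get : ∀ x, T0.get? x = if x ∈ chroms then some (pvVal0 x) else none := by
    intro x
    rw [hT0s, pv_get_foldl_insert chroms pvVal0 PySem.Dict.empty x, PySem.Dict.get?_empty]
  have hSpair : S.Pairwise (· ≤ ·) := PySem.List.sorted_pairwise chroms (fun x => x)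
  have hSmem : ∀ x, x ∈ S ↔ x ∈ chroms := fun x => PySem.List.mem_sorted chroms _ false x
  have hSfin : S.toFinset = chroms.toFinset :=
    List.toFinset_eq_of_perm _ _ (PySem.List.sorted_perm chroms _ false)
  have hOSnd : OS.Nodup := PySem.Set.nodup_ofList _
  have hOSmem : ∀ x, x ∈ OS ↔ (x ∈ chroms ∧ pvB_isOther x = true) := by
    intro x
    rw [hOSs, PySem.Set.mem_ofList, List.mem_filter]
  have hOSfin : OS.toFinset = chroms.toFinset.filter (fun y => pvB_isOther y = true) := by
    apply Finset.ext
    intro y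
    rw [List.mem_toFinset, hOSmem y, Finset.mem_filter, List.mem_toFinset]
  -- A's second loop
  obtain ⟨hA2g, hA2k, -⟩ := pvA_loop2 H S T0 0 hSpair
  -- keys of both final dicts are the distinct chroms in first-occurrence order
  have hT0keys : T0.keys = PySem.Set.ofList chroms := by
    rw [hT0s, PySem.Dict.keys_foldl_insert chroms (fun _ c => pvVal0 c) PySem.Dict.empty,
      PySem.Dict.keys_empty, PySem.Set.ofList_eq_foldl]
    rfl
  -- B's loop
  obtain ⟨hBg, hBk⟩ := pvB_loop H OS chroms PySem.Dict.empty
    (fun x hx => absurd hx (by simp [PySem.Dict.contains_empty]))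
  have hBkeys : (chroms.foldl (pvB_step H OS) PySem.Dict.empty).keys =
      PySem.Set.ofList chroms := by
    rw [hBk, PySem.Dict.keys_empty, PySem.Set.ofList_eq_foldl]
    rfl
  have hndK : (PySem.Set.ofList chroms).Nodup := PySem.Set.nodup_ofList chroms
  -- unfold both ports to maps over the common key list
  have hAitems : createChromHashCodeTable_py chroms =
      (PySem.Set.ofList chroms).map
        (fun k => (k, ((S.foldl (pvA_step2 H) (T0, (0 : Int))).1.get? k).getD none |>.getD 0)) := by
    show ((PySem.List.sorted chroms (fun x => x) false).foldl
        (pvA_step2 (chroms.foldl pvA_step1 (PySem.Dict.empty, 0)).2)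
        ((chroms.foldl pvA_step1 (PySem.Dict.empty, 0)).1, (0 : Int))).1.items.map
        (fun p => (p.1, p.2.getD 0)) = _
    rw [pvA_loop1_dict chroms PySem.Dict.empty 0, hHdef, ← hT0s, ← hSs]
    rw [PySem.Dict.items_eq_map_keys _ (by rw [hA2k, hT0keys]; exact hndK) none]
    rw [hA2k, hT0keys, List.map_map]
    apply List.map_congr_left
    intro k _
    simp [PySem.Dict.getD_eq_get?_getD]
  have hBitems : createChromHashCodeTable_py_alt chroms =
      (PySem.Set.ofList chroms).map (fun k => (k, pvB_g H OS k)) := by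
    show (chroms.foldl (pvB_step H OS) PySem.Dict.empty).items = _
    rw [PySem.Dict.items_eq_map_keys _ (by rw [hBkeys]; exact hndK) 0]
    rw [hBkeys]
    apply List.map_congr_left
    intro k hk
    have hkc : k ∈ chroms := (PySem.Set.mem_ofList chroms k).mp hk
    rw [PySem.Dict.getD_eq_get?_getD, hBg k, if_pos hkc]
    rfl
  rw [hAitems, hBitems]
  apply List.map_congr_left
  intro k hk
  have hkc : k ∈ chroms := (PySem.Set.mem_ofList chroms k).mp hk
  have hT0k : T0.get? k = some (pvVal0 k) := by rw [hT0get k, if_pos hkc]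
  by_cases hdig : PySem.Str.strIsdigit k = true
  · -- digit chromosome: both sides are int(k)
    have hv0 : pvVal0 k = some ((PySem.Int.ofStr? k).getD 0) := by
      unfold pvVal0; rw [if_pos hdig]
    have : (S.foldl (pvA_step2 H) (T0, (0 : Int))).1.get? k = some (pvVal0 k) := by
      rw [hA2g k, if_neg, hT0k]
      rintro ⟨-, hnone⟩
      rw [hT0k, hv0] at hnone
      simp at hnone
    rw [this, hv0]
    unfold pvB_g
    rw [if_pos hdig]
    rfl
  · -- non-digit: A assigned it in the sorted pass
    have hdig' : PySem.Str.strIsdigit k = false := by simpa using hdig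
    have hv0 : pvVal0 k = none := by
      unfold pvVal0; rw [if_neg (by rw [hdig']; exact Bool.false_ne_true)]
    have hpend : T0.get? k = some none := by rw [hT0k, hv0]
    have hA2gk : (S.foldl (pvA_step2 H) (T0, (0 : Int))).1.get? k =
        some (some (pvBr H k (0 + pvCntLt T0 S.toFinset k))) := by
      rw [hA2g k, if_pos ⟨(hSmem k).mpr hkc, hpend⟩]
    rw [hA2gk]
    simp only [Option.getD_some]
    unfold pvBr pvB_g
    rw [if_neg (show ¬PySem.Str.strIsdigit k = true by rw [hdig']; exact Bool.false_ne_true)]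
    split_ifs with h1 h2 h3
    · rfl
    · rfl
    · rfl
    · -- the 'other' branch: B's counting rank equals A's running index + 1
      obtain ⟨h3a, h3b⟩ := not_or.mp h3
      have hdigC : PySem.Chars.strIsdigit k.toList = false := by simpa using hdig'
      have hOk : k ∈ OS := (hOSmem k).mpr ⟨hkc, by
        rw [pvB_isOther_eq]
        simp [hdigC, pvUpOther, h1, h2, h3a, h3b]⟩
      have hcnt : pvCntLt T0 S.toFinset k = (OS.toFinset.filter (fun y => y < k)).card := by
        have hcongr : S.toFinset.filter (fun y => pvPend T0 y = true ∧ y < k) =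
            chroms.toFinset.filter (fun y => pvB_isOther y = true ∧ y < k) := by
          rw [hSfin]
          apply Finset.filter_congr
          intro y hy
          have hyc : y ∈ chroms := List.mem_toFinset.mp hy
          have : pvPend T0 y = pvB_isOther y := by
            unfold pvPend
            rw [hT0get y, if_pos hyc, pvB_isOther_eq]
            unfold pvVal0
            cases hyd : PySem.Str.strIsdigit y with
            | true => simp
            | false => simp
          rw [this]
        unfold pvCntLt
        rw [hcongr, hOSfin, Finset.filter_filter]
      have hcount := pv_countP_le OS hOSnd k hOk
      rw [hcnt]
      refine congrArg (Prod.mk k) ?_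
      rw [hcount]
      push_cast
      ring

-- ===== VERDICT (by name: the statement is the Claim_ definition above) =====
theorem createChromHashCodeTable_py_spec : Claim_equal_createChromHashCodeTable_py :=
  fun chroms _ => pv_main chroms
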